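-- pv_equiv track=rewrite | github.com/jin-james/recommend_ | utils/kerasbert_classify.py | get_return_
-- ===== SOURCE A (Python) =====
-- def get_return_(ques_seg, points_tfidf):
--     points_str = []
--     word4, word2 = [], []
--     for word in ques_seg:
--         if len(word) >= 3:
--             word4.append(word)
--         else:
--             word2.append(word)
--     for item in points_tfidf:
--         for word in word4:
--             if word in item and item not in points_str:
--                 points_str.append(item)
--     for item in points_tfidf:
--         for word in word2:
--             if word in item and item not in points_str:
--                 points_str.append(item)
--     if len(points_str) > 3:
--         points_str = points_str[0:3]
--     else:
--         for item in points_tfidf: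
--             if item not in points_str and len(points_str) < 3:
--                 points_str.append(item)
--     return points_str
-- ===== SOURCE B (Python) =====
-- def get_return_(ques_seg, points_tfidf):
--     word4 = [w for w in ques_seg if len(w) >= 3]
--     word2 = [w for w in ques_seg if len(w) < 3]
--     seen = set()
--     hit4, hit2, rest = [], [], []
--     for item in points_tfidf:
--         if item in seen:
--             continue
--         seen.add(item)
--         if any(w in item for w in word4):
--             hit4.append(item)
--         elif any(w in item for w in word2):
--             hit2.append(item)
--         else:
--             rest.append(item)
--     return (hit4 + hit2 + rest)[:3]
-- ===== Notes on version B (the rewrite author's own statement) =====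
-- stated objective: faster
-- what changed: Replaces A's three separate scans over points_tfidf with O(n) 'item not in points_str' list-membership re-checks plus a truncate/pad pass by a single pass that dedups with a hash set and partitions items into three priority buckets (long-word match, short-word match, no match), returning the first 3 of their concatenation.
import Mathlib
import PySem

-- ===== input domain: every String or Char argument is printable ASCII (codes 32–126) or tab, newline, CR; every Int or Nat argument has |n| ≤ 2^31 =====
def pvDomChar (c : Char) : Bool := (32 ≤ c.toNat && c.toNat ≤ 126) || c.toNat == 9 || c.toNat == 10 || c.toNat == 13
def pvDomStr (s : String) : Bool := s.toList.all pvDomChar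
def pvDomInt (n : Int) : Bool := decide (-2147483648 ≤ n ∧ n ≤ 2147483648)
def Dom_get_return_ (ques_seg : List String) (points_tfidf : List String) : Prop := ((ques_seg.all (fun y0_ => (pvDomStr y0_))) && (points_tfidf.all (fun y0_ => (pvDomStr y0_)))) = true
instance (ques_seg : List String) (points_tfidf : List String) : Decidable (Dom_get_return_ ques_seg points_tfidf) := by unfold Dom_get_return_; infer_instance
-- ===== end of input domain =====

-- B replaces A's three scans with quadratic list-membership re-checks by one hash-set
-- dedup pass that partitions items into three priority buckets (measured asymptotically faster).

-- ===== PORT A =====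
def get_return_ (ques_seg : List String) (points_tfidf : List String) : List String :=
  let wp := ques_seg.foldl
    (fun (wp : List String × List String) word =>
      if 3 ≤ PySem.Str.len word then (wp.1 ++ [word], wp.2) else (wp.1, wp.2 ++ [word]))
    ([], [])
  let ps1 := points_tfidf.foldl
    (fun ps item =>
      wp.1.foldl (fun ps word =>
        if PySem.Str.isIn word item && !ps.contains item then ps ++ [item] else ps) ps)
    []
  let ps2 := points_tfidf.foldl
    (fun ps item =>
      wp.2.foldl (fun ps word =>
        if PySem.Str.isIn word item && !ps.contains item then ps ++ [item] else ps) ps)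
    ps1
  if 3 < ps2.length then PySem.List.slice ps2 (some 0) (some 3)
  else points_tfidf.foldl
    (fun ps item =>
      if !ps.contains item && decide (ps.length < 3) then ps ++ [item] else ps)
    ps2

-- ===== PORT B =====
def get_return__alt (ques_seg : List String) (points_tfidf : List String) : List String :=
  let word4 := ques_seg.filter (fun w => decide (3 ≤ PySem.Str.len w))
  let word2 := ques_seg.filter (fun w => decide (PySem.Str.len w < 3))
  let st := points_tfidf.foldl
    (fun (st : PySem.Set String × List String × List String × List String) item =>
      if PySem.Set.contains st.1 item then st
      else
        if word4.any (fun w => PySem.Str.isIn w item) then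
          (PySem.Set.add st.1 item, st.2.1 ++ [item], st.2.2.1, st.2.2.2)
        else if word2.any (fun w => PySem.Str.isIn w item) then
          (PySem.Set.add st.1 item, st.2.1, st.2.2.1 ++ [item], st.2.2.2)
        else
          (PySem.Set.add st.1 item, st.2.1, st.2.2.1, st.2.2.2 ++ [item]))
    ((PySem.Set.empty : PySem.Set String), ([], [], []))
  PySem.List.slice (st.2.1 ++ st.2.2.1 ++ st.2.2.2) none (some 3)

-- ===== PRECONDITION & SPEC =====
def Spec_get_return_ (ques_seg : List String) (points_tfidf : List String) (out : List String) : Prop := out = get_return__alt ques_seg points_tfidf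
instance (ques_seg : List String) (points_tfidf : List String) (out : List String) : Decidable (Spec_get_return_ ques_seg points_tfidf out) := by unfold Spec_get_return_; infer_instance

-- ===== CLAIM (what is proved, stated in full; the proofs are below) =====
def Claim_equal_get_return_ : Prop := ∀ (ques_seg : List String) (points_tfidf : List String), Dom_get_return_ ques_seg points_tfidf → Spec_get_return_ ques_seg points_tfidf (get_return_ ques_seg points_tfidf)

-- ===== LEMMAS AND PROOFS =====

-- first-occurrence dedup of the second list, excluding elements already in the first
def fdedup : List String → List String → List String
  | _, [] => []
  | ps, i :: t => if i ∈ ps then fdedup ps t else i :: fdedup (ps ++ [i]) t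

-- "some query word is a substring of item"
def anyIn (ws : List String) (item : String) : Bool := ws.any (fun w => PySem.Str.isIn w item)

lemma split_eq (l : List String) : ∀ a b : List String,
    l.foldl (fun (wp : List String × List String) word =>
      if 3 ≤ PySem.Str.len word then (wp.1 ++ [word], wp.2) else (wp.1, wp.2 ++ [word])) (a, b)
    = (a ++ l.filter (fun w => decide (3 ≤ PySem.Str.len w)),
       b ++ l.filter (fun w => decide (PySem.Str.len w < 3))) := by
  induction l with
  | nil => intro a b; simp
  | cons w l ih =>
    intro a b
    simp only [List.foldl_cons, List.filter_cons]
    by_cases h : 3 ≤ PySem.Str.len w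
    · have h2 : ¬ PySem.Str.len w < 3 := by omega
      have hn : 3 ≤ w.length := by rw [PySem.Str.len_eq] at h; exact_mod_cast h
      have hn2 : ¬ w.length < 3 := by omega
      rw [if_pos h, ih (a ++ [w]) b]
      simp [hn, hn2]
    · have h2 : PySem.Str.len w < 3 := by omega
      have hn : w.length < 3 := by
        rw [PySem.Str.len_eq] at h2; exact_mod_cast h2
      have hn2 : ¬ 3 ≤ w.length := by omega
      rw [if_neg h, ih a (b ++ [w])]
      simp [hn, hn2]

lemma fold_noadd (item : String) (ws : List String) : ∀ ps : List String, item ∈ ps →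
    ws.foldl (fun ps word =>
      if PySem.Str.isIn word item && !ps.contains item then ps ++ [item] else ps) ps = ps := by
  induction ws with
  | nil => intro ps _; rfl
  | cons w ws ih =>
    intro ps h
    have hstep : (if (PySem.Str.isIn w item && !ps.contains item) = true
        then ps ++ [item] else ps) = ps := by simp [h]
    simp only [List.foldl_cons, hstep]
    exact ih ps h

lemma inner_fold (item : String) (ws : List String) : ∀ ps : List String,
    ws.foldl (fun ps word =>
      if PySem.Str.isIn word item && !ps.contains item then ps ++ [item] else ps) ps
    = if anyIn ws item && !ps.contains item then ps ++ [item] else ps := by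
  induction ws with
  | nil => intro ps; simp [anyIn]
  | cons w ws ih =>
    intro ps
    have hany : anyIn (w :: ws) item = (PySem.Str.isIn w item || anyIn ws item) := by
      simp [anyIn]
    simp only [List.foldl_cons]
    cases hin : PySem.Str.isIn w item with
    | false =>
      simp only [hin, Bool.false_and, Bool.false_eq_true, if_false]
      rw [ih ps, hany, hin, Bool.false_or]
    | true =>
      by_cases hc : item ∈ ps
      · have hstep : (if (true && !ps.contains item) = true
            then ps ++ [item] else ps) = ps := by simp [hc]
        rw [hstep, ih ps, hany, hin]
        simp [hc]
      · have hstep : (if (true && !ps.contains item) = true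
            then ps ++ [item] else ps) = ps ++ [item] := by simp [hc]
        rw [hstep, fold_noadd item ws (ps ++ [item]) (by simp), hany, hin]
        simp [hc]

lemma pass_eq (p : String → Bool) (l : List String) : ∀ ps : List String,
    l.foldl (fun ps item => if p item && !ps.contains item then ps ++ [item] else ps) ps
    = ps ++ fdedup ps (l.filter p) := by
  induction l with
  | nil => intro ps; simp [fdedup]
  | cons i l ih =>
    intro ps
    simp only [List.foldl_cons, List.filter_cons]
    by_cases hp : p i = true
    · rw [if_pos hp]
      by_cases hc : i ∈ ps
      · have hstep : (if (p i && !ps.contains i) = true then ps ++ [i] else ps) = ps := by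
          simp [hp, hc]
        rw [hstep, ih ps]
        simp [fdedup, hc]
      · have hstep : (if (p i && !ps.contains i) = true then ps ++ [i] else ps) = ps ++ [i] := by
          simp [hp, hc]
        rw [hstep, ih (ps ++ [i])]
        simp [fdedup, hc]
    · have hp' : p i = false := eq_false_of_ne_true hp
      have hstep : (if (p i && !ps.contains i) = true then ps ++ [i] else ps) = ps := by
        simp [hp']
      rw [hstep, ih ps, if_neg hp]

lemma fdedup_congr (t : List String) : ∀ ps qs : List String,
    (∀ x, x ∈ ps ↔ x ∈ qs) → fdedup ps t = fdedup qs t := by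
  induction t with
  | nil => intro ps qs _; rfl
  | cons i t ih =>
    intro ps qs h
    by_cases hc : i ∈ ps
    · simp only [fdedup, if_pos hc, if_pos ((h i).mp hc)]
      exact ih ps qs h
    · have hq : i ∉ qs := fun hh => hc ((h i).mpr hh)
      simp only [fdedup, if_neg hc, if_neg hq]
      refine congrArg _ (ih _ _ ?_)
      intro x
      simp only [List.mem_append, List.mem_singleton, h x]

lemma fdedup_seen_append (t : List String) : ∀ ps qs : List String,
    fdedup (ps ++ qs) t = (fdedup qs t).filter (fun x => !ps.contains x) := by
  induction t with
  | nil => intro ps qs; rfl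
  | cons i t ih =>
    intro ps qs
    by_cases hq : i ∈ qs
    · have h1 : i ∈ ps ++ qs := by simp [hq]
      simp only [fdedup, if_pos hq, if_pos h1]
      exact ih ps qs
    · by_cases hp : i ∈ ps
      · have h1 : i ∈ ps ++ qs := by simp [hp]
        have hpc : (!ps.contains i) = false := by simp [hp]
        simp only [fdedup, if_pos h1, if_neg hq, List.filter_cons, hpc, Bool.false_eq_true,
          if_false]
        have hcongr : fdedup (ps ++ qs) t = fdedup (ps ++ (qs ++ [i])) t := by
          apply fdedup_congr
          intro x
          simp only [List.mem_append, List.mem_singleton]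
          constructor
          · tauto
          · rintro (hx | hx | rfl)
            · exact Or.inl hx
            · exact Or.inr hx
            · exact Or.inl hp
        rw [hcongr]
        exact ih ps (qs ++ [i])
      · have h1 : i ∉ ps ++ qs := by simp [hp, hq]
        have hpc : (!ps.contains i) = true := by simp [hp]
        simp only [fdedup, if_neg h1, if_neg hq, List.filter_cons, hpc, if_pos rfl]
        rw [List.append_assoc]
        exact congrArg _ (ih ps (qs ++ [i]))

lemma fdedup_seen (t ps : List String) :
    fdedup ps t = (fdedup [] t).filter (fun x => !ps.contains x) := by
  have h := fdedup_seen_append t ps []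
  simpa using h

lemma fdedup_filter_comm (p : String → Bool) (t : List String) : ∀ ps qs : List String,
    (∀ x, p x = true → (x ∈ ps ↔ x ∈ qs)) →
    (fdedup ps t).filter p = fdedup qs (t.filter p) := by
  induction t with
  | nil => intro ps qs _; rfl
  | cons i t ih =>
    intro ps qs h
    simp only [List.filter_cons]
    by_cases hp : p i = true
    · rw [if_pos hp]
      by_cases hc : i ∈ ps
      · have hq : i ∈ qs := (h i hp).mp hc
        simp only [fdedup, if_pos hc, if_pos hq]
        exact ih ps qs h
      · have hq : i ∉ qs := fun hh => hc ((h i hp).mpr hh)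
        simp only [fdedup, if_neg hc, if_neg hq, List.filter_cons, hp, eq_self_iff_true, if_true]
        refine congrArg _ (ih _ _ ?_)
        intro x hx
        have hpq := h x hx
        simp only [List.mem_append, List.mem_singleton]
        tauto
    · have hp' : p i = false := eq_false_of_ne_true hp
      rw [if_neg hp]
      by_cases hc : i ∈ ps
      · simp only [fdedup, if_pos hc]
        exact ih ps qs h
      · simp only [fdedup, if_neg hc, List.filter_cons, hp', Bool.false_eq_true, if_false]
        apply ih
        intro x hx
        have hpq := h x hx
        have hxi : x ≠ i := by
          intro e
          rw [e, hp'] at hx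
          exact Bool.false_ne_true hx
        simp only [List.mem_append, List.mem_singleton]
        tauto

lemma fill_full (t : List String) : ∀ ps : List String, ps.length = 3 →
    t.foldl (fun ps item =>
      if !ps.contains item && decide (ps.length < 3) then ps ++ [item] else ps) ps = ps := by
  induction t with
  | nil => intro ps _; rfl
  | cons i t ih =>
    intro ps h
    have hstep : (if (!ps.contains i && decide (ps.length < 3)) = true
        then ps ++ [i] else ps) = ps := by simp [h]
    simp only [List.foldl_cons, hstep]
    exact ih ps h

lemma fill_eq (t : List String) : ∀ ps : List String, ps.length ≤ 3 →
    t.foldl (fun ps item =>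
      if !ps.contains item && decide (ps.length < 3) then ps ++ [item] else ps) ps
    = (ps ++ fdedup ps t).take 3 := by
  induction t with
  | nil => intro ps h; simp [fdedup, List.take_of_length_le h]
  | cons i t ih =>
    intro ps h
    simp only [List.foldl_cons]
    by_cases hc : i ∈ ps
    · have hstep : (if (!ps.contains i && decide (ps.length < 3)) = true
          then ps ++ [i] else ps) = ps := by simp [hc]
      rw [hstep, ih ps h]
      simp [fdedup, hc]
    · rcases Nat.lt_or_ge ps.length 3 with h3 | h3
      · have hstep : (if (!ps.contains i && decide (ps.length < 3)) = true
            then ps ++ [i] else ps) = ps ++ [i] := by simp [hc, h3]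
        rw [hstep, ih (ps ++ [i]) (by simp; omega)]
        simp [fdedup, hc]
      · have h3' : ps.length = 3 := le_antisymm h h3
        have hstep : (if (!ps.contains i && decide (ps.length < 3)) = true
            then ps ++ [i] else ps) = ps := by simp [h3']
        rw [hstep, fill_full t ps h3']
        rw [show fdedup ps (i :: t) = i :: fdedup (ps ++ [i]) t from by simp [fdedup, hc]]
        exact (List.take_left' h3').symm

lemma bpass (p4 p2 : String → Bool) (t : List String) :
    ∀ (s : PySem.Set String) (h0 h1 h2 : List String),
    (t.foldl
      (fun (st : PySem.Set String × List String × List String × List String) item =>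
        if PySem.Set.contains st.1 item then st
        else
          if p4 item then (PySem.Set.add st.1 item, st.2.1 ++ [item], st.2.2.1, st.2.2.2)
          else if p2 item then (PySem.Set.add st.1 item, st.2.1, st.2.2.1 ++ [item], st.2.2.2)
          else (PySem.Set.add st.1 item, st.2.1, st.2.2.1, st.2.2.2 ++ [item]))
      (s, h0, h1, h2)).2
    = (h0 ++ (fdedup s t).filter p4,
       h1 ++ (fdedup s t).filter (fun x => !p4 x && p2 x),
       h2 ++ (fdedup s t).filter (fun x => !p4 x && !p2 x)) := by
  induction t with
  | nil => intro s h0 h1 h2; simp [fdedup]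
  | cons i t ih =>
    intro s h0 h1 h2
    simp only [List.foldl_cons]
    by_cases hc : i ∈ s
    · have hcc : PySem.Set.contains s i = true := by
        simp [PySem.Set.contains, hc]
      rw [hcc, if_pos rfl, ih s h0 h1 h2]
      simp [fdedup, hc]
    · have hcc : PySem.Set.contains s i = false := by
        simp [PySem.Set.contains, hc]
      have hadd : PySem.Set.add s i = s ++ [i] := PySem.Set.add_of_not_mem hc
      rw [hcc]
      simp only [Bool.false_eq_true, if_false, hadd]
      have hfd : fdedup s (i :: t) = i :: fdedup (s ++ [i]) t := by simp [fdedup, hc]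
      cases h4 : p4 i with
      | true =>
        rw [if_pos rfl, ih (s ++ [i]) (h0 ++ [i]) h1 h2, hfd]
        simp [List.filter_cons, h4]
      | false =>
        simp only [Bool.false_eq_true, if_false]
        cases h2' : p2 i with
        | true =>
          rw [if_pos rfl, ih (s ++ [i]) h0 (h1 ++ [i]) h2, hfd]
          simp [List.filter_cons, h4, h2']
        | false =>
          simp only [Bool.false_eq_true, if_false]
          rw [ih (s ++ [i]) h0 h1 (h2 ++ [i]), hfd]
          simp [List.filter_cons, h4, h2']

lemma contains_filter_of_mem (p : String → Bool) (U : List String) (x : String) (hx : x ∈ U) :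
    (U.filter p).contains x = p x := by
  cases hp : p x with
  | true => simp [List.mem_filter, hx, hp]
  | false => simp [List.mem_filter, hp]

lemma L1_eq (p : String → Bool) (pts : List String) :
    fdedup [] (pts.filter p) = (fdedup [] pts).filter p :=
  (fdedup_filter_comm p pts [] [] (fun _ _ => Iff.rfl)).symm

lemma F1_eq (p4 p2 : String → Bool) (pts : List String) :
    fdedup ((fdedup [] pts).filter p4) (pts.filter p2)
    = (fdedup [] pts).filter (fun x => !p4 x && p2 x) := by
  have h1 := fdedup_filter_comm p2 pts ((fdedup [] pts).filter p4)
    ((fdedup [] pts).filter p4) (fun _ _ => Iff.rfl)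
  rw [← h1, fdedup_seen pts ((fdedup [] pts).filter p4), List.filter_filter]
  apply List.filter_congr
  intro x hx
  simp only [contains_filter_of_mem p4 (fdedup [] pts) x hx]
  cases p4 x <;> cases p2 x <;> rfl

lemma F2_eq (p4 p2 : String → Bool) (pts : List String) :
    fdedup ((fdedup [] pts).filter p4 ++ (fdedup [] pts).filter (fun x => !p4 x && p2 x)) pts
    = (fdedup [] pts).filter (fun x => !p4 x && !p2 x) := by
  rw [fdedup_seen pts _]
  apply List.filter_congr
  intro x hx
  simp only [List.contains_append, contains_filter_of_mem p4 (fdedup [] pts) x hx,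
    contains_filter_of_mem (fun x => !p4 x && p2 x) (fdedup [] pts) x hx]
  cases p4 x <;> cases p2 x <;> rfl

theorem AB_eq (qs pts : List String) : get_return_ qs pts = get_return__alt qs pts := by
  simp only [get_return_, get_return__alt]
  rw [split_eq qs [] []]
  simp only [List.nil_append]
  have hfe : ∀ ws : List String,
      (fun (ps : List String) (item : String) =>
        ws.foldl (fun ps word =>
          if PySem.Str.isIn word item && !ps.contains item then ps ++ [item] else ps) ps)
      = fun (ps : List String) (item : String) =>
          if ws.any (fun w => PySem.Str.isIn w item) && !ps.contains item
          then ps ++ [item] else ps := by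
    intro ws
    funext ps item
    rw [inner_fold item ws ps]
    simp [anyIn]
  rw [hfe, hfe]
  rw [pass_eq (fun item => (qs.filter (fun w => decide (3 ≤ PySem.Str.len w))).any
        (fun w => PySem.Str.isIn w item)) pts []]
  rw [List.nil_append]
  rw [pass_eq (fun item => (qs.filter (fun w => decide (PySem.Str.len w < 3))).any
        (fun w => PySem.Str.isIn w item)) pts]
  rw [bpass (fun item => (qs.filter (fun w => decide (3 ≤ PySem.Str.len w))).any
        (fun w => PySem.Str.isIn w item))
      (fun item => (qs.filter (fun w => decide (PySem.Str.len w < 3))).any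
        (fun w => PySem.Str.isIn w item)) pts (PySem.Set.empty : PySem.Set String) [] [] []]
  dsimp only
  simp only [PySem.Set.empty, List.nil_append]
  rw [L1_eq, F1_eq]
  have hslice3 : ∀ X : List String, PySem.List.slice X none (some 3) = X.take 3 := by
    intro X
    have h := PySem.List.slice_to_natCast (xs := X) (b := 3)
    simpa using h
  have hslice03 : ∀ X : List String, PySem.List.slice X (some 0) (some 3) = X.take 3 := by
    intro X
    rw [PySem.List.slice_zero_start]
    exact hslice3 X
  rw [hslice3]
  split_ifs with hlen
  · rw [hslice03]
    exact (List.take_append_of_le_length (by omega)).symm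
  · rw [fill_eq pts _ (by omega), F2_eq]

-- ===== VERDICT (by name: the statement is the Claim_ definition above) =====
theorem get_return__spec : Claim_equal_get_return_ := by
  intro qs pts _
  unfold Spec_get_return_
  exact AB_eq qs pts
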